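-- pv_equiv track=rewrite | github.com/judlozanol/ejercicios-repaso | MODULOS/Modulos II.py | validar_octal
-- ===== SOURCE A (Python) =====
-- def validar_octal(num):
--     if num=="":
--         return False
--     else:
--         lista = list(str(num))
--         a= len(lista)
--         i=0
--         while i<a:
--             if lista[i]=="0":
--                 lista.remove("0")
--                 i-=1
--             elif lista[i]=="1":
--                 lista.remove("1")
--                 i-=1
--             elif lista[i]=="2":
--                 lista.remove("2")
--                 i-=1
--             elif lista[i]=="3":
--                 lista.remove("3")
--                 i-=1
--             elif lista[i]=="4":
--                 lista.remove("4")
--                 i-=1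
--             elif lista[i]=="4":
--                 lista.remove("4")
--                 i-=1
--             elif lista[i]=="5":
--                 lista.remove("5")
--                 i-=1
--             elif lista[i]=="6":
--                 lista.remove("6")
--                 i-=1
--             elif lista[i]=="7":
--                 lista.remove("7")
--                 i-=1
--             i+=1
--             a=len(lista)
--         if len(lista)==0:
--             return True
--         else:
--             return False
-- ===== SOURCE B (Python) =====
-- def validar_octal(num):
--     s = str(num)
--     return s != "" and all(c in "01234567" for c in s)
-- ===== Notes on version B (the rewrite author's own statement) =====
-- stated objective: simpler
-- what changed: Replaces the quadratic remove-and-rescan while loop over a mutable list with a single linear scan that checks every character is an octal digit.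
import Mathlib
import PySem

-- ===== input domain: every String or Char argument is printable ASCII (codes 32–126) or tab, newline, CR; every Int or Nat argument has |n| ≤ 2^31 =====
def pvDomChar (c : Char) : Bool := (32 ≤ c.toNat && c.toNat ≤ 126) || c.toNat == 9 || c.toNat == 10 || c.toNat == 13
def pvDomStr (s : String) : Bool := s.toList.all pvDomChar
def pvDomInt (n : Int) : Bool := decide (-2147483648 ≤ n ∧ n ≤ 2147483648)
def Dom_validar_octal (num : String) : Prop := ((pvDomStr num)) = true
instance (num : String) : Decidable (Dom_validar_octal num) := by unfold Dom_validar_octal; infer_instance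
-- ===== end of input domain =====

-- B replaces A's quadratic remove-and-rescan while loop by a single linear membership scan.

-- ===== PORT A =====
-- helper for A's termination argument (cited by decreasing_by)
theorem remove_getD_length_lt {l : List Char} {c : Char} (h : c ∈ l) :
    ((PySem.List.remove? l c).getD l).length < l.length := by
  have hp := List.length_pos_of_mem h
  rw [PySem.List.remove?_eq_some_erase _ _ h]
  simp only [Option.getD_some, List.length_erase_of_mem h]
  omega

-- A's while loop; state is (lista, i); 'a = len(lista)' is recomputed each iteration.
-- lista[i] is read with pyGet?; the index is in range at every read A performs, so the
-- getD default is never consulted (pyGet? is exact; the default only totalises the read).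
-- Each elif branch removes the matched character lista[i] (whose value the branch test pins
-- down to the digit literal) and does i -= 1; the trailing i += 1 is fused into each call.
def validarOctalLoop (lista : List Char) (i : Int) : List Char :=
  if _h : i < (lista.length : Int) then
    let c := (PySem.List.pyGet? lista i).getD '\x00'
    if c = '0' then validarOctalLoop ((PySem.List.remove? lista c).getD lista) (i - 1 + 1)
    else if c = '1' then validarOctalLoop ((PySem.List.remove? lista c).getD lista) (i - 1 + 1)
    else if c = '2' then validarOctalLoop ((PySem.List.remove? lista c).getD lista) (i - 1 + 1)
    else if c = '3' then validarOctalLoop ((PySem.List.remove? lista c).getD lista) (i - 1 + 1)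
    else if c = '4' then validarOctalLoop ((PySem.List.remove? lista c).getD lista) (i - 1 + 1)
    else if c = '5' then validarOctalLoop ((PySem.List.remove? lista c).getD lista) (i - 1 + 1)
    else if c = '6' then validarOctalLoop ((PySem.List.remove? lista c).getD lista) (i - 1 + 1)
    else if c = '7' then validarOctalLoop ((PySem.List.remove? lista c).getD lista) (i - 1 + 1)
    else validarOctalLoop lista (i + 1)
  else lista
termination_by ((lista.length : Int) - i).toNat
decreasing_by
  all_goals first
  | omega
  | (cases hq : PySem.List.pyGet? lista i with
     | none => simp_all [c]
     | some c0 =>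
       have hm := PySem.List.mem_of_pyGet?_eq_some _ hq
       simp_all [c]
       have hlen := remove_getD_length_lt hm
       omega)

def validar_octal (num : String) : Bool :=
  if num = "" then false
  else
    let lista := num.toList
    let lista := validarOctalLoop lista 0
    if lista.length = 0 then true else false

-- ===== PORT B =====
def validar_octal_alt (num : String) : Bool :=
  let s := num
  (!(s = "")) && s.toList.all (fun c => "01234567".toList.contains c)

-- ===== PRECONDITION & SPEC =====
def Spec_validar_octal (num : String) (out : Bool) : Prop := out = validar_octal_alt num
instance (num : String) (out : Bool) : Decidable (Spec_validar_octal num out) := by unfold Spec_validar_octal; infer_instance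

-- ===== CLAIM (what is proved, stated in full; the proofs are below) =====
def Claim_equal_validar_octal : Prop := ∀ (num : String), Dom_validar_octal num → Spec_validar_octal num (validar_octal num)

-- ===== LEMMAS AND PROOFS =====

def isOct (c : Char) : Bool := "01234567".toList.contains c

theorem countP_erase_of_not (p : Char → Bool) (c : Char) (hc : p c = false) :
    ∀ l : List Char, (l.erase c).countP p = l.countP p := by
  intro l
  induction l with
  | nil => simp
  | cons x xs ih =>
    by_cases hx : x = c
    · subst hx; simp [List.erase_cons_head, hc]
    · rw [List.erase_cons_tail (by simp [hx])]
      simp [List.countP_cons, ih]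

theorem getD_eq_some (lista : List Char) (i : Int) (d : Char) (hd : d ≠ '\x00')
    (h : (PySem.List.pyGet? lista i).getD '\x00' = d) : PySem.List.pyGet? lista i = some d := by
  cases hq : PySem.List.pyGet? lista i with
  | none => rw [hq] at h; simp only [Option.getD_none] at h; exact absurd h.symm hd
  | some c0 => rw [hq] at h; simp only [Option.getD_some] at h; rw [h]

-- the loop never changes the number of non-octal characters
theorem loop_countP (lista : List Char) (i : Int) :
    (validarOctalLoop lista i).countP (fun c => !isOct c) = lista.countP (fun c => !isOct c) := by
  induction lista, i using validarOctalLoop.induct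
  case case1 lista i h c hc ih =>
    have hg := getD_eq_some lista i '0' (by decide) hc
    have hmem := PySem.List.mem_of_pyGet?_eq_some _ hg
    simp only [hc] at ih
    have hz : i - 1 + 1 = i := by omega
    rw [hz] at ih
    rw [PySem.List.remove?_eq_some_erase _ _ hmem, Option.getD_some] at ih
    rw [validarOctalLoop]
    simp [h, hg, ih, PySem.List.remove?_eq_some_erase _ _ hmem,
      countP_erase_of_not (fun c => !isOct c) '0' (by decide)]
  case case2 lista i h c _ hc ih =>
    have hg := getD_eq_some lista i '1' (by decide) hc
    have hmem := PySem.List.mem_of_pyGet?_eq_some _ hg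
    simp only [hc] at ih
    have hz : i - 1 + 1 = i := by omega
    rw [hz] at ih
    rw [PySem.List.remove?_eq_some_erase _ _ hmem, Option.getD_some] at ih
    rw [validarOctalLoop]
    simp [h, hg, ih, PySem.List.remove?_eq_some_erase _ _ hmem,
      countP_erase_of_not (fun c => !isOct c) '1' (by decide)]
  case case3 lista i h c _ _ hc ih =>
    have hg := getD_eq_some lista i '2' (by decide) hc
    have hmem := PySem.List.mem_of_pyGet?_eq_some _ hg
    simp only [hc] at ih
    have hz : i - 1 + 1 = i := by omega
    rw [hz] at ih
    rw [PySem.List.remove?_eq_some_erase _ _ hmem, Option.getD_some] at ih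
    rw [validarOctalLoop]
    simp [h, hg, ih, PySem.List.remove?_eq_some_erase _ _ hmem,
      countP_erase_of_not (fun c => !isOct c) '2' (by decide)]
  case case4 lista i h c _ _ _ hc ih =>
    have hg := getD_eq_some lista i '3' (by decide) hc
    have hmem := PySem.List.mem_of_pyGet?_eq_some _ hg
    simp only [hc] at ih
    have hz : i - 1 + 1 = i := by omega
    rw [hz] at ih
    rw [PySem.List.remove?_eq_some_erase _ _ hmem, Option.getD_some] at ih
    rw [validarOctalLoop]
    simp [h, hg, ih, PySem.List.remove?_eq_some_erase _ _ hmem,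
      countP_erase_of_not (fun c => !isOct c) '3' (by decide)]
  case case5 lista i h c _ _ _ _ hc ih =>
    have hg := getD_eq_some lista i '4' (by decide) hc
    have hmem := PySem.List.mem_of_pyGet?_eq_some _ hg
    simp only [hc] at ih
    have hz : i - 1 + 1 = i := by omega
    rw [hz] at ih
    rw [PySem.List.remove?_eq_some_erase _ _ hmem, Option.getD_some] at ih
    rw [validarOctalLoop]
    simp [h, hg, ih, PySem.List.remove?_eq_some_erase _ _ hmem,
      countP_erase_of_not (fun c => !isOct c) '4' (by decide)]
  case case6 lista i h c _ _ _ _ _ hc ih =>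
    have hg := getD_eq_some lista i '5' (by decide) hc
    have hmem := PySem.List.mem_of_pyGet?_eq_some _ hg
    simp only [hc] at ih
    have hz : i - 1 + 1 = i := by omega
    rw [hz] at ih
    rw [PySem.List.remove?_eq_some_erase _ _ hmem, Option.getD_some] at ih
    rw [validarOctalLoop]
    simp [h, hg, ih, PySem.List.remove?_eq_some_erase _ _ hmem,
      countP_erase_of_not (fun c => !isOct c) '5' (by decide)]
  case case7 lista i h c _ _ _ _ _ _ hc ih =>
    have hg := getD_eq_some lista i '6' (by decide) hc
    have hmem := PySem.List.mem_of_pyGet?_eq_some _ hg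
    simp only [hc] at ih
    have hz : i - 1 + 1 = i := by omega
    rw [hz] at ih
    rw [PySem.List.remove?_eq_some_erase _ _ hmem, Option.getD_some] at ih
    rw [validarOctalLoop]
    simp [h, hg, ih, PySem.List.remove?_eq_some_erase _ _ hmem,
      countP_erase_of_not (fun c => !isOct c) '6' (by decide)]
  case case8 lista i h c _ _ _ _ _ _ _ hc ih =>
    have hg := getD_eq_some lista i '7' (by decide) hc
    have hmem := PySem.List.mem_of_pyGet?_eq_some _ hg
    simp only [hc] at ih
    have hz : i - 1 + 1 = i := by omega
    rw [hz] at ih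
    rw [PySem.List.remove?_eq_some_erase _ _ hmem, Option.getD_some] at ih
    rw [validarOctalLoop]
    simp [h, hg, ih, PySem.List.remove?_eq_some_erase _ _ hmem,
      countP_erase_of_not (fun c => !isOct c) '7' (by decide)]
  case case9 lista i h c h0 h1 h2 h3 h4 h5 h6 h7 ih =>
    rw [validarOctalLoop]
    simp only [dif_pos h]
    simp only [if_neg (show ¬ (PySem.List.pyGet? lista i).getD '\x00' = '0' from h0),
      if_neg (show ¬ (PySem.List.pyGet? lista i).getD '\x00' = '1' from h1),
      if_neg (show ¬ (PySem.List.pyGet? lista i).getD '\x00' = '2' from h2),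
      if_neg (show ¬ (PySem.List.pyGet? lista i).getD '\x00' = '3' from h3),
      if_neg (show ¬ (PySem.List.pyGet? lista i).getD '\x00' = '4' from h4),
      if_neg (show ¬ (PySem.List.pyGet? lista i).getD '\x00' = '5' from h5),
      if_neg (show ¬ (PySem.List.pyGet? lista i).getD '\x00' = '6' from h6),
      if_neg (show ¬ (PySem.List.pyGet? lista i).getD '\x00' = '7' from h7)]
    exact ih
  case case10 lista i h =>
    rw [validarOctalLoop]
    simp [h]

-- if every character is octal, the loop empties the list (it always works at index 0)
theorem loop_all_oct (lista : List Char) :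
    lista.all isOct = true → validarOctalLoop lista 0 = [] := by
  induction lista with
  | nil => intro _; rw [validarOctalLoop]; norm_num
  | cons x xs ih =>
    intro hall
    simp only [List.all_cons, Bool.and_eq_true] at hall
    obtain ⟨hx, hxs⟩ := hall
    rw [validarOctalLoop]
    have hlt : (0 : Int) < ((x :: xs).length : Int) := by
      exact_mod_cast Nat.succ_pos xs.length
    simp only [dif_pos hlt]
    have hoct : x = '0' ∨ x = '1' ∨ x = '2' ∨ x = '3' ∨ x = '4' ∨ x = '5' ∨ x = '6' ∨ x = '7' := by
      revert hx; simp [isOct]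
    have hz : ((0:Int) - 1 + 1) = 0 := by norm_num
    rcases hoct with h|h|h|h|h|h|h|h <;>
      · subst h
        simp [PySem.List.remove?_cons_self, ih hxs]

theorem loop_char (lista : List Char) :
    (validarOctalLoop lista 0 = []) = (lista.all isOct = true) := by
  by_cases hall : lista.all isOct = true
  · simp [loop_all_oct lista hall, hall]
  · have hc := loop_countP lista 0
    have hex : ∃ c ∈ lista, isOct c = false := by
      by_contra hno
      push_neg at hno
      exact hall (List.all_eq_true.mpr (fun c hcm => by have := hno c hcm; simpa using this))
    obtain ⟨c, hcm, hco⟩ := hex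
    have hpos : 0 < lista.countP (fun c => !isOct c) :=
      List.countP_pos_iff.mpr ⟨c, hcm, by simp [hco]⟩
    have hne : validarOctalLoop lista 0 ≠ [] := by
      intro he; rw [he] at hc; simp at hc; omega
    simp only [eq_iff_iff]
    exact iff_of_false hne hall

-- ===== VERDICT (by name: the statement is the Claim_ definition above) =====
theorem validar_octal_spec : Claim_equal_validar_octal := by
  intro num _
  unfold Spec_validar_octal validar_octal validar_octal_alt
  by_cases h : num = ""
  · simp [h]
  · simp only [if_neg h]
    have hchar := loop_char num.toList
    by_cases hall : num.toList.all isOct = true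
    · have : validarOctalLoop num.toList 0 = [] := by rw [hchar]; exact hall
      simp [this, h, isOct] at *
      exact hall
    · have hne : ¬ (validarOctalLoop num.toList 0 = []) := by rw [hchar]; exact hall
      have hlen : (validarOctalLoop num.toList 0).length ≠ 0 := by
        simpa [List.length_eq_zero_iff] using hne
      simp only [if_neg hlen]
      simp [isOct] at hall
      simp [h]
      obtain ⟨c, hcm, hco⟩ := hall
      exact ⟨c, hcm, hco⟩
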